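-- pv_equiv track=rewrite | github.com/JuanGonzalezCaminero/Seam_Carving | Main.py | getEnergyUsingModule
-- ===== SOURCE A (Python) =====
-- def getEnergyUsingModule(image, bitDepth):
--     #the energy of each pixel is calculated as the sum of the intensity difference between
--     #the previous and next pixels in both x and y axis, for the pixels in the border of the
--     #image, the intensity of the pixels that would be outside the image is taken as the intensity
--     #of the pixel in the border
--     bitsPerChannel = 2 ** bitDepth
--     energyMatrix = []
--     for i in range(len(image)):
--         energyMatrix.append([])
--         for j in range(len(image[i])):
--             pixelEnergyX = 0
--             pixelEnergyY = 0
--             if i == 0 or i == len(image) - 1: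
--                 if i == 0:
--                     pixelEnergyY = abs(image[i][j] - image[i + 1][j])
--                 if i == len(image) - 1:
--                     pixelEnergyY = abs(image[i - 1][j] - image[i][j])
--             else:
--                 pixelEnergyY = abs(image[i - 1][j] - image[i + 1][j])
--
--             if j == 0 or j == len(image[i]) - 1:
--                 if j == 0:
--                     pixelEnergyX = abs(image[i][j] - image[i][j + 1])
--                 if j == len(image[i]) - 1:
--                     pixelEnergyX = abs(image[i][j - 1] - image[i][j])
--             else:
--                 pixelEnergyX = abs(image[i][j - 1] - image[i][j + 1])
--
--             energyMatrix[i].append((pixelEnergyX + pixelEnergyY)%bitsPerChannel)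
--
--     return energyMatrix
-- ===== SOURCE B (Python) =====
-- def getEnergyUsingModule(image, bitDepth):
--     # Padding-based reformulation: replicate border rows/columns outward once,
--     # then compute every cell with one uniform formula (no border branching).
--     bits = 2 ** bitDepth
--     if not image:
--         return []
--     rows = [image[0]] + image + [image[-1]]
--     padded = [([r[0]] + r + [r[-1]] if r else []) for r in rows]
--     return [[(abs(padded[i + 1][j] - padded[i + 1][j + 2])
--               + abs(padded[i][j + 1] - padded[i + 2][j + 1])) % bits
--              for j in range(len(row))]
--             for i, row in enumerate(image)]
-- ===== Notes on version B (the rewrite author's own statement) =====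
-- stated objective: simpler
-- what changed: Replaces A's nine-way per-cell border case analysis with a one-time border-replicating padding pass, after which every cell is computed by a single uniform formula.
-- outside the precondition, e.g. on getEnergyUsingModule([[1, 2], [3, 4]], -1): A returns [[0.0, 0.0], [0.0, 0.0]], B returns [[0.0, 0.0], [0.0, 0.0]]
import Mathlib
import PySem

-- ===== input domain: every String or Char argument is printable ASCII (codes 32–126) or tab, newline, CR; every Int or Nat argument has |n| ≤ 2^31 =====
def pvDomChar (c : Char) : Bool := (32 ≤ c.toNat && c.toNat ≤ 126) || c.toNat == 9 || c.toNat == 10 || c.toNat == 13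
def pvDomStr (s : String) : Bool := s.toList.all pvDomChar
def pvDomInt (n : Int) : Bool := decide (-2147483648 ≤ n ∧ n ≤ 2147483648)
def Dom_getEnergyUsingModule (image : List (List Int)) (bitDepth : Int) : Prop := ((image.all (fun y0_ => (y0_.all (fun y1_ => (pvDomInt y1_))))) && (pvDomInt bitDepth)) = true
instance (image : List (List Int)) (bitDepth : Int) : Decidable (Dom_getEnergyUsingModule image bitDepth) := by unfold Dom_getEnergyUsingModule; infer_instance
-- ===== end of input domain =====

-- B replaces A's per-cell border case analysis by a border-replicating padding pass
-- followed by one uniform formula per cell (objective: simpler).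

-- ===== PORT A =====
-- image[a][b] on the in-range indices A actually reads (on Pre_ inputs all reads are in range)
def pvAGet (image : List (List Int)) (a b : Nat) : Int := (image.getD a []).getD b 0

def getEnergyUsingModule (image : List (List Int)) (bitDepth : Int) : List (List Int) :=
  let bits : Int := 2 ^ bitDepth.toNat
  let n := image.length
  (List.range n).map (fun i =>
    (List.range (image.getD i []).length).map (fun j =>
      let w := (image.getD i []).length
      let pixelEnergyY : Int :=
        if i = 0 ∨ i = n - 1 then
          let y1 : Int := if i = 0 then |pvAGet image i j - pvAGet image (i+1) j| else 0
          if i = n - 1 then |pvAGet image (i-1) j - pvAGet image i j| else y1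
        else |pvAGet image (i-1) j - pvAGet image (i+1) j|
      let pixelEnergyX : Int :=
        if j = 0 ∨ j = w - 1 then
          let x1 : Int := if j = 0 then |pvAGet image i j - pvAGet image i (j+1)| else 0
          if j = w - 1 then |pvAGet image i (j-1) - pvAGet image i j| else x1
        else |pvAGet image i (j-1) - pvAGet image i (j+1)|
      PySem.Int.mod (pixelEnergyX + pixelEnergyY) bits))

-- ===== PORT B =====
def pvPadRow (r : List Int) : List Int :=
  if r = [] then [] else [r.headD 0] ++ r ++ [r.getLastD 0]

def getEnergyUsingModule_alt (image : List (List Int)) (bitDepth : Int) : List (List Int) :=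
  let bits : Int := 2 ^ bitDepth.toNat
  if image = [] then []
  else
    let rows := [image.headD []] ++ image ++ [image.getLastD []]
    let padded := rows.map pvPadRow
    (PySem.List.enumerate image).map (fun p =>
      (List.range p.2.length).map (fun j =>
        PySem.Int.mod
          (|pvAGet padded (p.1.toNat + 1) j - pvAGet padded (p.1.toNat + 1) (j + 2)| +
           |pvAGet padded p.1.toNat (j + 1) - pvAGet padded (p.1.toNat + 2) (j + 1)|) bits))

-- ===== PRECONDITION & SPEC =====
-- Pre_ excludes: negative bitDepth, on which A returns floats (2**bitDepth is fractional,
-- not a List Int value); and images that are ragged, a single nonempty row, or have rows of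
-- width 1, on all of which A raises IndexError.
def Pre_getEnergyUsingModule (image : List (List Int)) (bitDepth : Int) : Prop :=
  0 ≤ bitDepth ∧
  (∀ row ∈ image, row.length = (image.headD []).length) ∧
  (image.headD []).length ≠ 1 ∧
  (image.length = 1 → image.headD [] = [])
instance (image : List (List Int)) (bitDepth : Int) : Decidable (Pre_getEnergyUsingModule image bitDepth) := by unfold Pre_getEnergyUsingModule; infer_instance

def pvWitness_getEnergyUsingModule : List (List Int) × Int := ([[1, 2], [3, 4], [5, 9]], 8)

def Spec_getEnergyUsingModule (image : List (List Int)) (bitDepth : Int) (out : List (List Int)) : Prop := out = getEnergyUsingModule_alt image bitDepth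
instance (image : List (List Int)) (bitDepth : Int) (out : List (List Int)) : Decidable (Spec_getEnergyUsingModule image bitDepth out) := by unfold Spec_getEnergyUsingModule; infer_instance

-- ===== CLAIM (what is proved, stated in full; the proofs are below) =====
def Claim_equal_getEnergyUsingModule : Prop := ∀ (image : List (List Int)) (bitDepth : Int), Dom_getEnergyUsingModule image bitDepth → Pre_getEnergyUsingModule image bitDepth → Spec_getEnergyUsingModule image bitDepth (getEnergyUsingModule image bitDepth)

-- ===== LEMMAS AND PROOFS =====

theorem pv_enum_map {α β : Type} (l : List α) (d : α) (g : Int × α → β) :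
    (PySem.List.enumerate l).map g
      = (List.range l.length).map (fun i => g (Int.ofNat i, l.getD i d)) := by
  apply List.ext_getElem
  · simp [PySem.List.length_enumerate]
  · intro k h1 h2
    simp [PySem.List.length_enumerate] at h1
    simp [PySem.List.getElem_enumerate, List.getD_eq_getElem?_getD, List.getElem?_eq_getElem h1]

theorem pv_padded_getD (image : List (List Int)) (k : Nat) (hk : k ≤ image.length + 1) :
    (((([image.headD []] ++ image ++ [image.getLastD []]).map pvPadRow)).getD k [])
      = pvPadRow (if k = 0 then image.getD 0 []
                  else if k = image.length + 1 then image.getD (image.length - 1) []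
                  else image.getD (k - 1) []) := by
  have hlast : image.getLastD [] = image.getD (image.length - 1) [] := by
    rw [List.getLastD_eq_getLast?, List.getLast?_eq_getElem?, List.getD_eq_getElem?_getD]
  rcases k with _ | k
  · rcases image with _ | ⟨a, t⟩ <;> simp
  · have h1 : (([image.headD []] ++ image ++ [image.getLastD []]).map pvPadRow).getD (k+1) []
        = ((image ++ [image.getLastD []]).map pvPadRow).getD k [] := by
      simp [List.getD_eq_getElem?_getD]
    rw [h1]
    by_cases hk1 : k = image.length
    · subst hk1
      simp [List.getD_eq_getElem?_getD, List.getLast?_eq_getElem?]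
    · have hklt : k < image.length := by omega
      have h2 : k < (image.map pvPadRow).length := by simpa using hklt
      simp [List.getD_eq_getElem?_getD, List.getElem?_append_left h2,
            List.getElem?_eq_getElem h2, List.getElem_map, hk1,
            List.getElem?_eq_getElem hklt]

theorem pv_padRow_getD (r : List Int) (k : Nat) (hr : r ≠ []) (hk : k ≤ r.length + 1) :
    (pvPadRow r).getD k 0
      = (if k = 0 then r.getD 0 0
         else if k = r.length + 1 then r.getD (r.length - 1) 0
         else r.getD (k - 1) 0) := by
  have hr' : pvPadRow r = [r.headD 0] ++ r ++ [r.getLastD 0] := by simp [pvPadRow, hr]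
  rw [hr']
  rcases k with _ | k
  · rcases r with _ | ⟨a, t⟩ <;> simp
  · by_cases hk1 : k = r.length
    · subst hk1
      simp [List.getD_eq_getElem?_getD, List.getLastD_eq_getLast?, List.getLast?_eq_getElem?]
    · have hklt : k < r.length := by omega
      have h2 : k < ([r.headD 0] ++ r).length - 1 := by simp; omega
      simp [List.getD_eq_getElem?_getD, List.getElem?_append, hklt, hk1]

theorem pv_getD_mem {α : Type} (l : List α) (d : α) (t : Nat) (h : t < l.length) :
    l.getD t d ∈ l := by
  rw [List.getD_eq_getElem?_getD, List.getElem?_eq_getElem h]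
  simp

theorem pv_X (r : List Int) (j : Nat) (h2 : 2 ≤ r.length) (hj : j < r.length) :
    (if j = 0 ∨ j = r.length - 1 then
       if j = r.length - 1 then |r.getD (j-1) 0 - r.getD j 0|
       else if j = 0 then |r.getD j 0 - r.getD (j+1) 0| else 0
     else |r.getD (j-1) 0 - r.getD (j+1) 0|)
    = |(pvPadRow r).getD j 0 - (pvPadRow r).getD (j+2) 0| := by
  have hne : r ≠ [] := by intro h; subst h; simp at h2
  rw [pv_padRow_getD r j hne (by omega), pv_padRow_getD r (j+2) hne (by omega)]
  by_cases h0 : j = 0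
  · subst h0
    rw [if_pos (Or.inl rfl), if_neg (by omega), if_pos rfl, if_pos rfl,
        if_neg (by omega), if_neg (by omega)]
  · by_cases hN : j = r.length - 1
    · rw [if_pos (Or.inr hN), if_pos hN, if_neg h0, if_neg (by omega),
          if_neg (by omega), if_pos (by omega)]
      rw [hN]
    · rw [if_neg (by tauto), if_neg h0, if_neg (by omega), if_neg (by omega),
          if_neg (by omega)]
      simp

-- ===== VERDICT (by name: the statement is the Claim_ definition above) =====
theorem getEnergyUsingModule_spec : Claim_equal_getEnergyUsingModule := by
  intro image bitDepth _ hpre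
  obtain ⟨hbd, hrect, hw1, hone⟩ := hpre
  unfold Spec_getEnergyUsingModule getEnergyUsingModule getEnergyUsingModule_alt
  by_cases himg : image = []
  · subst himg; simp
  · rw [if_neg himg, pv_enum_map image []]
    apply List.map_congr_left
    intro i hi
    simp only [List.mem_range] at hi
    apply List.map_congr_left
    intro j hj
    simp only [List.mem_range] at hj
    have htoi : (Int.ofNat i).toNat = i := rfl
    simp only [htoi]
    have hlen : ∀ t, t < image.length → (image.getD t []).length = (image.headD []).length :=
      fun t ht => hrect _ (pv_getD_mem image [] t ht)
    have hwj : j < (image.headD []).length := by rw [← hlen i hi]; exact hj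
    have hw2 : 2 ≤ (image.headD []).length := by
      rcases Nat.lt_or_ge (image.headD []).length 2 with h | h
      · interval_cases h' : (image.headD []).length <;> omega
      · exact h
    have hn2 : 2 ≤ image.length := by
      rcases Nat.lt_or_ge image.length 2 with h | h
      · have h1 : image.length = 1 := by
          rcases Nat.eq_zero_or_pos image.length with h0 | h0
          · omega
          · omega
        have := hone h1
        rw [this] at hw2; simp at hw2
      · exact h
    have hPgetD := pv_padded_getD image
    have hPi1 : ((([image.headD []] ++ image ++ [image.getLastD []]).map pvPadRow)).getD (i+1) []
        = pvPadRow (image.getD i []) := by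
      rw [hPgetD (i+1) (by omega),
          if_neg (show ¬ (i+1 = 0) by omega),
          if_neg (show ¬ (i+1 = image.length + 1) by omega)]
      simp
    have hPi : ((([image.headD []] ++ image ++ [image.getLastD []]).map pvPadRow)).getD i []
        = pvPadRow (image.getD (i-1) []) := by
      by_cases h0 : i = 0
      · subst h0; rw [hPgetD 0 (by omega), if_pos rfl]
      · rw [hPgetD i (by omega), if_neg h0,
            if_neg (show ¬ (i = image.length + 1) by omega)]
    have hPi2 : ((([image.headD []] ++ image ++ [image.getLastD []]).map pvPadRow)).getD (i+2) []
        = pvPadRow (image.getD (min (i+1) (image.length - 1)) []) := by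
      by_cases hN : i = image.length - 1
      · rw [hPgetD (i+2) (by omega),
            if_neg (show ¬ (i+2 = 0) by omega),
            if_pos (show i+2 = image.length + 1 by omega)]
        congr 2; omega
      · rw [hPgetD (i+2) (by omega),
            if_neg (show ¬ (i+2 = 0) by omega),
            if_neg (show ¬ (i+2 = image.length + 1) by omega)]
        congr 2; omega
    have hrowpad : ∀ t, t < image.length →
        (pvPadRow (image.getD t [])).getD (j+1) 0 = (image.getD t []).getD j 0 := by
      intro t ht
      have hl := hlen t ht
      have hne : image.getD t [] ≠ [] := by
        intro h; rw [h, List.length_nil] at hl; omega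
      rw [pv_padRow_getD (image.getD t []) (j+1) hne (by omega),
          if_neg (show ¬ (j+1 = 0) by omega),
          if_neg (show ¬ (j+1 = (image.getD t []).length + 1) by omega)]
      simp
    congr 1
    congr 1
    · -- X part
      simp only [pvAGet, hPi1]
      exact pv_X (image.getD i []) j (by rw [hlen i hi]; omega) hj
    · -- Y part
      simp only [pvAGet, hPi, hPi2]
      rw [hrowpad (i-1) (by omega), hrowpad (min (i+1) (image.length - 1)) (by omega)]
      by_cases h0 : i = 0
      · subst h0
        rw [if_pos (Or.inl rfl), if_neg (by omega), if_pos rfl]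
        have : min (0+1) (image.length - 1) = 1 := by omega
        rw [this]
      · by_cases hN : i = image.length - 1
        · rw [if_pos (Or.inr hN), if_pos hN]
          have : min (i+1) (image.length - 1) = i := by omega
          rw [this]
        · rw [if_neg (by tauto)]
          have : min (i+1) (image.length - 1) = i + 1 := by omega
          rw [this]
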